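-- pv_equiv track=rewrite | github.com/e-tony/Dissecting_Implicit_Bias_in_Language_Models | src/analysis/generate_mlm_heatmap.py | sort_pronouns
-- ===== SOURCE A (Python) =====
-- def sort_pronouns(words, weights):
--     assert (len(words) == len(weights))
--     pronouns = ["she", "her", "he", "his", "him", "they", "their", "them"]
--
--     new_words = []
--     new_weights = []
--
--     for p in pronouns:
--         for i, v in enumerate(words):
--             if v == p:
--                 new_words.append(v)
--                 new_weights.append(weights[i])
--
--     return new_words, new_weights
-- ===== SOURCE B (Python) =====
-- def sort_pronouns(words, weights):
--     assert (len(words) == len(weights))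
--     pronouns = ["she", "her", "he", "his", "him", "they", "their", "them"]
--     pset = set(pronouns)
--     groups = {}
--     for w, wt in zip(words, weights):
--         if w in pset:
--             groups[w] = groups.get(w, []) + [wt]
--     new_words = []
--     new_weights = []
--     for p in pronouns:
--         ws = groups.get(p, [])
--         new_words += [p] * len(ws)
--         new_weights += ws
--     return new_words, new_weights
-- ===== Notes on version B (the rewrite author's own statement) =====
-- stated objective: simpler
-- what changed: A scans the whole word list once per pronoun (8 passes, appending on each match); B makes a single grouping pass over zip(words, weights) into a dict pronoun -> collected weights and then one emission pass over the fixed priority list.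
import Mathlib
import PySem

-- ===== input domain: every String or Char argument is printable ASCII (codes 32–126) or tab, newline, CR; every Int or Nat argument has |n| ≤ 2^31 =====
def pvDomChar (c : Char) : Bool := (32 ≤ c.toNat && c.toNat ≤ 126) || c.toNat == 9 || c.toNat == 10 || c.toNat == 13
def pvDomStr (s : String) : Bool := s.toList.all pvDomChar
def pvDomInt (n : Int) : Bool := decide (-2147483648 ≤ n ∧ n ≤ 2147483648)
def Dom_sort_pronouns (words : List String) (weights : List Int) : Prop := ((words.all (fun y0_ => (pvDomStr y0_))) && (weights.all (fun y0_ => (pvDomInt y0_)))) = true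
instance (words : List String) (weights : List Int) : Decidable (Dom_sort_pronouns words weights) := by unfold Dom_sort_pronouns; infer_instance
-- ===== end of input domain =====

-- B replaces A's eight repeated scans of `words` by one grouping pass over zip(words, weights)
-- into a dict pronoun -> collected weights plus one emission pass over the priority list (objective: simpler).

-- ===== PORT A =====
-- weights[i]: inside Pre_ (equal lengths) the enumerate index is always in range, so pyGetD's default is never reached.
def sort_pronouns (words : List String) (weights : List Int) : List String × List Int :=
  let pronouns : List String := ["she", "her", "he", "his", "him", "they", "their", "them"]
  pronouns.foldl (fun acc p =>
    (PySem.List.enumerate words).foldl (fun acc iv =>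
      if iv.2 == p then (acc.1 ++ [iv.2], acc.2 ++ [PySem.List.pyGetD weights iv.1 0]) else acc) acc)
    ([], [])

-- ===== PORT B =====
def sort_pronouns_alt (words : List String) (weights : List Int) : List String × List Int :=
  let pronouns : List String := ["she", "her", "he", "his", "him", "they", "their", "them"]
  let pset : PySem.Set String := PySem.Set.ofList pronouns
  let groups : PySem.Dict String (List Int) :=
    (words.zip weights).foldl
      (fun d q => if PySem.Set.contains pset q.1 then d.modify q.1 [] (· ++ [q.2]) else d)
      PySem.Dict.empty
  pronouns.foldl (fun acc p =>
    let ws := groups.getD p []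
    (acc.1 ++ List.replicate ws.length p, acc.2 ++ ws)) ([], [])

-- ===== PRECONDITION & SPEC =====
-- A (and B) raise AssertionError when the two lists have different lengths; Pre_ excludes exactly that.
def Pre_sort_pronouns (words : List String) (weights : List Int) : Prop :=
  words.length = weights.length
instance (words : List String) (weights : List Int) : Decidable (Pre_sort_pronouns words weights) := by unfold Pre_sort_pronouns; infer_instance
def pvWitness_sort_pronouns : List String × List Int := (["she", "cat", "him"], [1, 2, 3])

def Spec_sort_pronouns (words : List String) (weights : List Int) (out : List String × List Int) : Prop := out = sort_pronouns_alt words weights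
instance (words : List String) (weights : List Int) (out : List String × List Int) : Decidable (Spec_sort_pronouns words weights out) := by unfold Spec_sort_pronouns; infer_instance

-- ===== CLAIM (what is proved, stated in full; the proofs are below) =====
def Claim_equal_sort_pronouns : Prop := ∀ (words : List String) (weights : List Int), Dom_sort_pronouns words weights → Pre_sort_pronouns words weights → Spec_sort_pronouns words weights (sort_pronouns words weights)

-- ===== LEMMAS AND PROOFS =====

lemma pv_enum_zip : ∀ (ws : List String) (pre tl : List Int), ws.length = tl.length →
    (PySem.List.enumerate ws (pre.length : Int)).map
      (fun iv => (iv.2, PySem.List.pyGetD (pre ++ tl) iv.1 0)) = ws.zip tl := by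
  intro ws
  induction ws with
  | nil => intro pre tl h; cases tl <;> simp_all [PySem.List.enumerate]
  | cons x ws ih =>
    intro pre tl h
    cases tl with
    | nil => simp at h
    | cons y tl' =>
      rw [PySem.List.enumerate_cons]
      simp only [List.map_cons, List.zip_cons_cons]
      have hy : PySem.List.pyGetD (pre ++ y :: tl') (pre.length : Int) 0 = y := by
        rw [PySem.List.pyGetD_natCast]
        simp
      rw [hy]
      have h2 : ((pre ++ [y]).length : Int) = (pre.length : Int) + 1 := by simp
      have := ih (pre ++ [y]) tl' (by simpa using h)
      rw [h2] at this
      simp only [List.append_assoc, List.singleton_append] at this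
      rw [this]


lemma pv_inner (weights : List Int) (P : String) :
    ∀ (l : List (Int × String)) (acc : List String × List Int),
    l.foldl (fun acc iv => if iv.2 == P then (acc.1 ++ [iv.2], acc.2 ++ [PySem.List.pyGetD weights iv.1 0]) else acc) acc
    = (acc.1 ++ (l.filter (fun iv => iv.2 == P)).map (fun iv => iv.2),
       acc.2 ++ (l.filter (fun iv => iv.2 == P)).map (fun iv => PySem.List.pyGetD weights iv.1 0)) := by
  intro l
  induction l with
  | nil => simp
  | cons iv l ih =>
    intro acc
    by_cases hiv : (iv.2 == P) = true
    · simp only [List.foldl_cons, hiv, if_true, List.filter_cons, List.map_cons]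
      rw [ih]
      simp
    · simp only [List.foldl_cons, hiv, if_false, List.filter_cons, Bool.false_eq_true]
      exact ih acc

lemma sort_pronouns_spec_aux (words : List String) (weights : List Int)
    (h : words.length = weights.length) :
    sort_pronouns words weights = sort_pronouns_alt words weights := by
  unfold sort_pronouns sort_pronouns_alt
  dsimp only
  have hzip : (PySem.List.enumerate words (0:Int)).map
      (fun iv => (iv.2, PySem.List.pyGetD weights iv.1 0)) = words.zip weights := by
    have := pv_enum_zip words [] weights h
    simpa using this
  apply PySem.List.foldl_congr_mem
  intro acc p hp
  rw [pv_inner]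
  -- B side: grouping dict
  rw [PySem.List.foldl_if_eq_foldl_filter]
  rw [PySem.Dict.getD_foldl_modify_append]
  rw [PySem.Dict.getD_empty]
  -- double filter collapses since p ∈ pset
  have hps : PySem.Set.contains (PySem.Set.ofList ["she", "her", "he", "his", "him", "they", "their", "them"]) p = true := by
    fin_cases hp <;> decide
  have hff : ((words.zip weights).filter (fun q => PySem.Set.contains (PySem.Set.ofList ["she", "her", "he", "his", "him", "they", "their", "them"]) q.1)).filter
        (fun q => q.1 == p)
      = (words.zip weights).filter (fun q => q.1 == p) := by
    rw [List.filter_filter]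
    apply List.filter_congr
    intro q _
    rcases eq_or_ne q.1 p with hq | hq
    · simp only [hq, hps, Bool.and_true, beq_self_eq_true]
    · simp [hq]
  rw [hff]
  -- relate zip-filter to enumerate-filter
  have kv : ((words.zip weights).filter (fun q => q.1 == p)).map (fun q => q.2)
      = ((PySem.List.enumerate words).filter (fun iv => iv.2 == p)).map
          (fun iv => PySem.List.pyGetD weights iv.1 0) := by
    rw [← hzip, List.filter_map, List.map_map]
    rfl
  simp only [List.nil_append]
  rw [kv]
  -- words component: replicate
  have hrep : ((PySem.List.enumerate words (0:Int)).filter (fun iv => iv.2 == p)).map (fun iv => iv.2)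
      = List.replicate (((PySem.List.enumerate words (0:Int)).filter (fun iv => iv.2 == p)).map
          (fun iv => PySem.List.pyGetD weights iv.1 0)).length p := by
    rw [List.eq_replicate_iff]
    refine ⟨by simp, ?_⟩
    intro b hb
    simp only [List.mem_map, List.mem_filter] at hb
    obtain ⟨iv, ⟨_, hiv⟩, rfl⟩ := hb
    exact eq_of_beq hiv
  rw [hrep]

-- ===== VERDICT (by name: the statement is the Claim_ definition above) =====
theorem sort_pronouns_spec : Claim_equal_sort_pronouns := by
  intro words weights _ hpre
  exact sort_pronouns_spec_aux words weights hpre
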